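-- pv_equiv track=rewrite | github.com/sfuentesbongenaar/advent-of-code-py | 2022/day_04_camp_cleanup.py | compare_ranges
-- ===== SOURCE A (Python) =====
-- def compare_ranges(pair_of_ranges):  # for complete overlap
--     first_range = pair_of_ranges[0]
--     second_range = pair_of_ranges[1]
--     overlap_flag = 0
--     if all(x in first_range for x in second_range):
--         overlap_flag = 1
--     elif all(x in second_range for x in first_range):
--         overlap_flag = 1
--     return overlap_flag
-- ===== SOURCE B (Python) =====
-- def _dedup_sorted(xs):
--     out = []
--     for x in xs:
--         if not out or out[-1] != x:
--             out.append(x)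
--     return out
--
--
-- def compare_ranges(pair_of_ranges):  # for complete overlap
--     first_range = pair_of_ranges[0]
--     second_range = pair_of_ranges[1]
--     du = _dedup_sorted(sorted(first_range + second_range))
--     da = _dedup_sorted(sorted(first_range))
--     db = _dedup_sorted(sorted(second_range))
--     return 1 if len(du) == len(da) or len(du) == len(db) else 0
-- ===== Notes on version B (the rewrite author's own statement) =====
-- stated objective: alternative
-- what changed: Instead of A's two directional membership scans, B sorts each list and their concatenation, collapses adjacent duplicates in one linear pass, and decides containment purely by comparing the distinct-element counts: |union| == |first| or |union| == |second|.
import Mathlib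
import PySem

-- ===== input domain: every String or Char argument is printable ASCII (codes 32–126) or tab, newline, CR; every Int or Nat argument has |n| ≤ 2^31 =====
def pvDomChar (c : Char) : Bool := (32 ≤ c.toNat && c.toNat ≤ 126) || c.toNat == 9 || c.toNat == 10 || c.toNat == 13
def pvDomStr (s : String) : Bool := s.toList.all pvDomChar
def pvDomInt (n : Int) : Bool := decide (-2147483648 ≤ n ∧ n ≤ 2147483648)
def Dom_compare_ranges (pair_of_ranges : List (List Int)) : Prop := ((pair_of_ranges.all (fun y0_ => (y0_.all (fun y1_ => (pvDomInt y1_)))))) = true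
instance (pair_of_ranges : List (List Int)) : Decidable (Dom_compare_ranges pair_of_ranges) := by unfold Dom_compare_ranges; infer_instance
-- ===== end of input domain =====

-- B decides mutual containment by sorting, collapsing adjacent duplicates, and comparing
-- distinct-element counts (|union| = |first| or |union| = |second|) instead of A's two
-- directional membership scans; return values are equal on every input A accepts.

-- ===== PORT A =====
def compare_ranges (pair_of_ranges : List (List Int)) : Int :=
  match PySem.List.pyGet? pair_of_ranges 0, PySem.List.pyGet? pair_of_ranges 1 with
  | some first_range, some second_range =>
    let overlap_flag : Int := 0
    if second_range.all (fun x => first_range.contains x) then 1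
    else if first_range.all (fun x => second_range.contains x) then 1
    else overlap_flag
  | _, _ => 0  -- unreachable under Pre_ (Python raises IndexError)

-- ===== PORT B =====
-- port of Source B's _dedup_sorted: one pass, append x unless it equals the last element kept
def dedupSorted (xs : List Int) : List Int :=
  xs.foldl (fun out x => if out.getLast? = some x then out else out ++ [x]) []

def compare_ranges_alt (pair_of_ranges : List (List Int)) : Int :=
  -- getD [] is only a totalization: under Pre_ both lookups are `some` (Python raises IndexError otherwise)
  let first_range := (PySem.List.pyGet? pair_of_ranges 0).getD []
  let second_range := (PySem.List.pyGet? pair_of_ranges 1).getD []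
  let du := dedupSorted (PySem.List.sorted (first_range ++ second_range) (fun x => x) false)
  let da := dedupSorted (PySem.List.sorted first_range (fun x => x) false)
  let db := dedupSorted (PySem.List.sorted second_range (fun x => x) false)
  if du.length = da.length ∨ du.length = db.length then 1 else 0

-- ===== PRECONDITION & SPEC =====
-- A indexes pair_of_ranges[0] and [1]: it raises IndexError unless the list has at least 2 elements.
def Pre_compare_ranges (pair_of_ranges : List (List Int)) : Prop := 2 ≤ pair_of_ranges.length
instance (pair_of_ranges : List (List Int)) : Decidable (Pre_compare_ranges pair_of_ranges) := by unfold Pre_compare_ranges; infer_instance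
def pvWitness_compare_ranges : List (List Int) := [[2, 3, 4], [3, 4]]
def Spec_compare_ranges (pair_of_ranges : List (List Int)) (out : Int) : Prop := out = compare_ranges_alt pair_of_ranges
instance (pair_of_ranges : List (List Int)) (out : Int) : Decidable (Spec_compare_ranges pair_of_ranges out) := by unfold Spec_compare_ranges; infer_instance

-- ===== CLAIM (what is proved, stated in full; the proofs are below) =====
def Claim_equal_compare_ranges : Prop := ∀ (pair_of_ranges : List (List Int)), Dom_compare_ranges pair_of_ranges → Pre_compare_ranges pair_of_ranges → Spec_compare_ranges pair_of_ranges (compare_ranges pair_of_ranges)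

-- ===== LEMMAS AND PROOFS =====

-- membership in the dedup fold: exactly the elements of the accumulator and of the input
theorem mem_dedup_fold (xs : List Int) (acc : List Int) (y : Int) :
    (y ∈ xs.foldl (fun out x => if out.getLast? = some x then out else out ++ [x]) acc) ↔
      y ∈ acc ∨ y ∈ xs := by
  induction xs generalizing acc with
  | nil => simp
  | cons x xs ih =>
    simp only [List.foldl_cons]
    by_cases h : acc.getLast? = some x
    · rw [if_pos h, ih]
      have hx : x ∈ acc := List.mem_of_getLast? h
      constructor
      · rintro (h1 | h1)
        · exact Or.inl h1
        · exact Or.inr (List.mem_cons_of_mem _ h1)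
      · rintro (h1 | h1)
        · exact Or.inl h1
        · rcases List.mem_cons.mp h1 with rfl | h2
          · exact Or.inl hx
          · exact Or.inr h2
    · rw [if_neg h, ih]
      simp [List.mem_append, List.mem_cons, or_assoc]

theorem le_getLast_of_pairwise_lt (acc : List Int) (l : Int)
    (hp : acc.Pairwise (· < ·)) (hl : acc.getLast? = some l) :
    ∀ a ∈ acc, a ≤ l := by
  induction acc with
  | nil => simp at hl
  | cons x xs ih =>
    intro a ha
    cases xs with
    | nil =>
      simp at hl ha
      omega
    | cons z zs =>
      rw [List.getLast?_cons_cons] at hl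
      rcases List.mem_cons.mp ha with rfl | ha'
      · have hlz : l ∈ z :: zs := List.mem_of_getLast? hl
        have := (List.pairwise_cons.mp hp).1 l hlz
        omega
      · exact ih (List.pairwise_cons.mp hp).2 hl a ha'

-- the dedup fold preserves strict sortedness when fed a nondecreasing list
theorem pairwise_dedup_fold (xs : List Int) (acc : List Int)
    (hs : xs.Pairwise (· ≤ ·)) (hacc : acc.Pairwise (· < ·))
    (hle : ∀ a ∈ acc, ∀ y ∈ xs, a ≤ y) :
    (xs.foldl (fun out x => if out.getLast? = some x then out else out ++ [x]) acc).Pairwise (· < ·) := by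
  induction xs generalizing acc with
  | nil => simpa using hacc
  | cons x xs ih =>
    obtain ⟨hx, hs'⟩ := List.pairwise_cons.mp hs
    simp only [List.foldl_cons]
    by_cases h : acc.getLast? = some x
    · rw [if_pos h]
      exact ih acc hs' hacc (fun a ha y hy => hle a ha y (List.mem_cons_of_mem _ hy))
    · rw [if_neg h]
      refine ih (acc ++ [x]) hs' ?_ ?_
      · rw [List.pairwise_append]
        refine ⟨hacc, List.pairwise_singleton _ _, ?_⟩
        intro a ha b hb
        rcases List.mem_singleton.mp hb with rfl
        have hax : a ≤ b := hle a ha b (List.mem_cons_self)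
        rcases lt_or_eq_of_le hax with hlt | rfl
        · exact hlt
        · -- a = x ∈ acc, but getLast? acc ≠ some x: contradiction with last maximality
          exfalso
          cases hlast : acc.getLast? with
          | none =>
              rw [List.getLast?_eq_none_iff.mp hlast] at ha
              exact absurd ha (List.not_mem_nil)
          | some l =>
            have h1 : a ≤ l := le_getLast_of_pairwise_lt acc l hacc hlast a ha
            have h2 : l ∈ acc := List.mem_of_getLast? hlast
            have h3 : l ≤ a := hle l h2 a (List.mem_cons_self)
            have : l = a := le_antisymm h3 h1
            exact h (this ▸ hlast)
      · intro a ha y hy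
        rcases List.mem_append.mp ha with ha' | ha'
        · exact hle a ha' y (List.mem_cons_of_mem _ hy)
        · rcases List.mem_singleton.mp ha' with rfl
          exact hx y hy

theorem mem_dedupSorted (xs : List Int) (y : Int) : y ∈ dedupSorted xs ↔ y ∈ xs := by
  unfold dedupSorted
  rw [mem_dedup_fold]
  simp

theorem nodup_dedupSorted_sorted (xs : List Int) :
    (dedupSorted (PySem.List.sorted xs (fun x => x) false)).Nodup := by
  have hp : (dedupSorted (PySem.List.sorted xs (fun x => x) false)).Pairwise (· < ·) := by
    unfold dedupSorted
    exact pairwise_dedup_fold _ []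
      (by simpa using PySem.List.sorted_pairwise (xs := xs) (key := fun x => x))
      (List.Pairwise.nil) (by simp)
  exact hp.imp (fun h => ne_of_lt h)

-- length of the dedup of the sort = number of distinct elements
theorem length_dedupSorted_sorted (xs : List Int) :
    (dedupSorted (PySem.List.sorted xs (fun x => x) false)).length = xs.toFinset.card := by
  have hnd := nodup_dedupSorted_sorted xs
  have hset : (dedupSorted (PySem.List.sorted xs (fun x => x) false)).toFinset = xs.toFinset := by
    ext y
    simp [List.mem_toFinset, mem_dedupSorted, PySem.List.mem_sorted]
  rw [← hset, List.toFinset_card_of_nodup hnd]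

theorem union_card_eq_iff (a b : List Int) :
    ((a ++ b).toFinset.card = a.toFinset.card) ↔ (∀ x ∈ b, x ∈ a) := by
  rw [List.toFinset_append]
  constructor
  · intro hcard x hx
    have hsub : a.toFinset ⊆ a.toFinset ∪ b.toFinset := Finset.subset_union_left
    have heq : a.toFinset ∪ b.toFinset = a.toFinset :=
      (Finset.eq_of_subset_of_card_le hsub (le_of_eq hcard)).symm
    have : x ∈ a.toFinset ∪ b.toFinset := Finset.mem_union_right _ (List.mem_toFinset.mpr hx)
    rw [heq] at this
    exact List.mem_toFinset.mp this
  · intro hsub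
    congr 1
    apply Finset.union_eq_left.mpr
    intro x hx
    exact List.mem_toFinset.mpr (hsub x (List.mem_toFinset.mp hx))

-- ===== VERDICT (by name: the statement is the Claim_ definition above) =====
theorem compare_ranges_spec : Claim_equal_compare_ranges := by
  intro p _ hpre
  have h2 : 2 ≤ p.length := hpre
  obtain ⟨a, h0⟩ : ∃ a, PySem.List.pyGet? p 0 = some a := by
    refine ⟨p[0], ?_⟩
    have := PySem.List.pyGet?_natCast (xs := p) (n := 0)
    simp only [Int.natCast_zero] at this
    rw [this, List.getElem?_eq_getElem]
  obtain ⟨b, h1⟩ : ∃ b, PySem.List.pyGet? p 1 = some b := by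
    refine ⟨p[1], ?_⟩
    have := PySem.List.pyGet?_natCast (xs := p) (n := 1)
    simp only [Int.natCast_one] at this
    rw [this, List.getElem?_eq_getElem]
  unfold Spec_compare_ranges compare_ranges compare_ranges_alt
  simp only [h0, h1, Option.getD_some]
  simp only [length_dedupSorted_sorted]
  have hba : ((a ++ b).toFinset.card = a.toFinset.card) ↔ (∀ x ∈ b, x ∈ a) := union_card_eq_iff a b
  have hab : ((a ++ b).toFinset.card = b.toFinset.card) ↔ (∀ x ∈ a, x ∈ b) := by
    have := union_card_eq_iff b a
    constructor
    · intro h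
      apply this.mp
      rw [← h]
      congr 1
      rw [List.toFinset_append, List.toFinset_append, Finset.union_comm]
    · intro h
      rw [show (a ++ b).toFinset.card = (b ++ a).toFinset.card by
        rw [List.toFinset_append, List.toFinset_append, Finset.union_comm]]
      exact this.mpr h
  by_cases hP : ∀ x ∈ b, x ∈ a
  · rw [if_pos (by simpa [List.contains_iff_mem] using hP),
        if_pos (Or.inl (hba.mpr hP))]
  · rw [if_neg (by simpa [List.contains_iff_mem] using hP)]
    by_cases hQ : ∀ x ∈ a, x ∈ b
    · rw [if_pos (by simpa [List.contains_iff_mem] using hQ),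
          if_pos (Or.inr (hab.mpr hQ))]
    · rw [if_neg (by simpa [List.contains_iff_mem] using hQ),
          if_neg (by
            rintro (h | h)
            · exact hP (hba.mp h)
            · exact hQ (hab.mp h))]
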